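-- pv_equiv track=rewrite | github.com/JonKragskow/Waveplot | pages/core/utils.py | add_label_indices
-- ===== SOURCE A (Python) =====
-- def remove_label_indices(labels):
--     """
--     Remove label indexing from atomic symbols
--     indexing is either numbers or numbers followed by letters:
--     e.g. H1, H2, H3
--     or H1a, H2a, H3a
--
--     Parameters
--     ----------
--     labels : list
--         atomic labels
--
--     Returns
--     -------
--     list
--         atomic labels without indexing
--     """
--
--     labels_nn = []
--     for label in labels:
--         no_digits = []
--         for i in label:
--             if not i.isdigit():
--                 no_digits.append(i)
--             elif i.isdigit():
--                 break
--         result = ''.join(no_digits)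
--         labels_nn.append(result)
--
--     return labels_nn
--
-- def add_label_indices(labels, style='per_element'):
--     """
--     Add label indexing to atomic symbols - either element or per atom.
--
--     Parameters
--     ----------
--     labels : list
--         atomic labels
--     style : str, optional
--         {'per_element', 'sequential'}
--             'per_element' : Index by element e.g. Dy1, Dy2, N1, N2, etc.
--             'sequential' : Index the atoms 1->N regardless of element
--
--     Returns
--     -------
--     list
--         atomic labels with indexing
--     """
--
--     # remove numbers just in case
--     labels_nn = remove_label_indices(labels)
--
--     # Just number the atoms 1->N regardless of element
--     if style == 'sequential':
--         labels_wn = ['{}{:d}'.format(lab, it+1)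
--                      for (it, lab) in enumerate(labels)]
--
--     # Index by element Dy1, Dy2, N1, N2, etc.
--     if style == 'per_element':
--         # Get list of unique elements
--         atoms = set(labels_nn)
--         # Create dict to keep track of index of current atom of each element
--         atom_count = {atom: 1 for atom in atoms}
--         # Create labelled list of elements
--         labels_wn = []
--         for lab in labels_nn:
--             # Index according to dictionary
--             labels_wn.append("{}{:d}".format(lab, atom_count[lab]))
--             # Then add one to dictionary
--             atom_count[lab] += 1
--
--     return labels_wn
-- ===== SOURCE B (Python) =====
-- def _strip(label):
--     # slice off everything from the first digit on
--     for i, ch in enumerate(label):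
--         if ch.isdigit():
--             return label[:i]
--     return label
--
--
-- def add_label_indices(labels, style='per_element'):
--     if style == 'sequential':
--         return ['{}{:d}'.format(lab, it) for (it, lab) in enumerate(labels, 1)]
--     if style == 'per_element':
--         labels_nn = [_strip(lab) for lab in labels]
--         return ['{}{:d}'.format(lab, labels_nn[:i + 1].count(lab))
--                 for (i, lab) in enumerate(labels_nn)]
--     raise ValueError('unknown style')
-- ===== Notes on version B (the rewrite author's own statement) =====
-- stated objective: simpler
-- what changed: Drops the set/dict index table entirely: each per_element index is recomputed as the count of the stripped label in the prefix up to the current position, and stripping slices at the first digit instead of accumulating characters; early returns per style.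
import Mathlib
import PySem

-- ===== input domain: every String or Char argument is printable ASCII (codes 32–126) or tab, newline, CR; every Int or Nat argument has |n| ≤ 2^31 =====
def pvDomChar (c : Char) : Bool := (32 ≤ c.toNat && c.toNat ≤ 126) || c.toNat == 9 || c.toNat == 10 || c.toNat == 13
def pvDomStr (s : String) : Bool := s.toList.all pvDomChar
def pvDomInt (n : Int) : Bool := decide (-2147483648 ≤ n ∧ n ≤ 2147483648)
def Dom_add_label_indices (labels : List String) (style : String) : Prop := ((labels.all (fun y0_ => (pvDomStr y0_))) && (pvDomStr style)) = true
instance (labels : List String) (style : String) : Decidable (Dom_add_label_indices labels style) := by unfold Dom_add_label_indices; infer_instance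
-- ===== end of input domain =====

-- B drops A's set/dict index table: per_element indices are recomputed as prefix counts of the
-- stripped label, stripping slices at the first digit, and each style branch returns early.

-- ===== PORT A =====
-- A: inner char loop of remove_label_indices — append while not a digit, break at the first digit
def pvNoDigitsA : List Char → List Char
  | [] => []
  | c :: rest => if !(PySem.Chars.isdigit c) then c :: pvNoDigitsA rest else []

def remove_label_indices (labels : List String) : List String :=
  labels.foldl (fun labels_nn label => labels_nn ++ [String.mk (pvNoDigitsA label.toList)]) []

def add_label_indices (labels : List String) (style : String) : List String :=
  let labels_nn := remove_label_indices labels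
  -- labels_wn : Option models the possibly-undefined local (NameError outside Pre_ → .getD [])
  let r1 : Option (List String) :=
    if style = "sequential" then
      some ((PySem.List.enumerate labels 0).map (fun p => p.2 ++ PySem.Int.toStr (p.1 + 1)))
    else none
  let r2 : Option (List String) :=
    if style = "per_element" then
      let atoms : PySem.Set String := PySem.Set.ofList labels_nn
      let atom_count : PySem.Dict String Int :=
        atoms.foldl (fun d atom => d.insert atom 1) PySem.Dict.empty
      some ((labels_nn.foldl
        (fun (st : PySem.Dict String Int × List String) lab =>
          (st.1.modify lab 0 (· + 1), st.2 ++ [lab ++ PySem.Int.toStr (st.1.getD lab 0)]))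
        (atom_count, [])).2)
    else r1
  r2.getD []

-- ===== PORT B =====
-- B: _strip — scan with an index, slice off everything from the first digit on
def pvStripBAux (orig : List Char) (rest : List Char) (i : Nat) : List Char :=
  match rest with
  | [] => orig
  | ch :: t => if PySem.Chars.isdigit ch then orig.take i else pvStripBAux orig t (i + 1)

def pvStripB (label : String) : String :=
  String.mk (pvStripBAux label.toList label.toList 0)

def add_label_indices_alt (labels : List String) (style : String) : List String :=
  if style = "sequential" then
    (PySem.List.enumerate labels 1).map (fun p => p.2 ++ PySem.Int.toStr p.1)
  else if style = "per_element" then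
    let labels_nn := labels.map pvStripB
    (PySem.List.enumerate labels_nn 0).map
      (fun p => p.2 ++ PySem.Int.toStr
        (PySem.List.count (PySem.List.slice labels_nn none (some (p.1 + 1))) p.2))
  else []  -- Python B raises ValueError here; outside Pre_

-- ===== PRECONDITION & SPEC =====
-- A raises NameError (labels_wn undefined) for any style other than the two supported ones; B raises ValueError there.
def Pre_add_label_indices (labels : List String) (style : String) : Prop :=
  style = "sequential" ∨ style = "per_element"
instance (labels : List String) (style : String) : Decidable (Pre_add_label_indices labels style) := by
  unfold Pre_add_label_indices; infer_instance

def pvWitness_add_label_indices : List String × String := (["Dy1", "Dy2", "N1"], "per_element")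

def Spec_add_label_indices (labels : List String) (style : String) (out : List String) : Prop := out = add_label_indices_alt labels style
instance (labels : List String) (style : String) (out : List String) : Decidable (Spec_add_label_indices labels style out) := by unfold Spec_add_label_indices; infer_instance

-- ===== CLAIM (what is proved, stated in full; the proofs are below) =====
def Claim_equal_add_label_indices : Prop := ∀ (labels : List String) (style : String), Dom_add_label_indices labels style → Pre_add_label_indices labels style → Spec_add_label_indices labels style (add_label_indices labels style)

-- ===== LEMMAS AND PROOFS =====

-- both strippers keep the prefix before the first digit
theorem pvStripBAux_eq (rest pre : List Char) (h : ∀ c ∈ pre, PySem.Chars.isdigit c = false) :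
    pvStripBAux (pre ++ rest) rest pre.length = pre ++ pvNoDigitsA rest := by
  induction rest generalizing pre with
  | nil => simp [pvStripBAux, pvNoDigitsA]
  | cons c t ih =>
    by_cases hc : PySem.Chars.isdigit c
    · simp [pvStripBAux, pvNoDigitsA, hc]
    · have := ih (pre ++ [c]) (by
        intro x hx
        rcases List.mem_append.mp hx with h1 | h1
        · exact h x h1
        · simp at h1; subst h1; simpa using hc)
      simp only [pvStripBAux, pvNoDigitsA, hc]
      simpa using this

theorem pvStripB_eq (s : String) : pvStripB s = String.mk (pvNoDigitsA s.toList) := by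
  have h := pvStripBAux_eq s.toList [] (by intro c h; simp at h)
  simp only [List.nil_append, List.length_nil] at h
  exact congrArg String.mk h

theorem remove_eq_map (labels : List String) :
    remove_label_indices labels = labels.map pvStripB := by
  unfold remove_label_indices
  rw [PySem.List.foldl_append_singleton_eq_map]
  exact (List.map_congr_left (fun s _ => (pvStripB_eq s).symm))

-- sequential: shifting the enumeration start by one absorbs the "+ 1"
theorem enumerate_shift (xs : List String) (s : Int) :
    (PySem.List.enumerate xs s).map (fun p => p.2 ++ PySem.Int.toStr (p.1 + 1))
      = (PySem.List.enumerate xs (s + 1)).map (fun p => p.2 ++ PySem.Int.toStr p.1) := by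
  induction xs generalizing s with
  | nil => simp [PySem.List.enumerate_nil]
  | cons x t ih => simp [PySem.List.enumerate_cons, ih]

-- abstract per-element labelling against a count function
def pvPerElem : List String → (String → Int) → List String
  | [], _ => []
  | x :: xs, c => (x ++ PySem.Int.toStr (c x)) :: pvPerElem xs (fun y => if y = x then c y + 1 else c y)

theorem pvPerElem_congr (l : List String) (c c' : String → Int)
    (h : ∀ x ∈ l, c x = c' x) : pvPerElem l c = pvPerElem l c' := by
  induction l generalizing c c' with
  | nil => rfl
  | cons x t ih =>
    simp only [pvPerElem, h x (by simp)]
    congr 1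
    exact ih _ _ (by
      intro y hy
      by_cases hyx : y = x <;> simp [hyx, h y (by simp [hy]), h x (by simp)])

-- A's fold produces pvPerElem of the dict's current counts
theorem loopA_eq (l : List String) (d : PySem.Dict String Int) (acc : List String) :
    (l.foldl
      (fun (st : PySem.Dict String Int × List String) lab =>
        (st.1.modify lab 0 (· + 1), st.2 ++ [lab ++ PySem.Int.toStr (st.1.getD lab 0)]))
      (d, acc)).2 = acc ++ pvPerElem l (fun x => d.getD x 0) := by
  induction l generalizing d acc with
  | nil => simp [pvPerElem]
  | cons x t ih =>
    simp only [List.foldl_cons, pvPerElem]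
    rw [ih]
    simp only [List.append_assoc, List.singleton_append]
    congr 2
    exact pvPerElem_congr _ _ _ (by
      intro y _
      by_cases hyx : y = x
      · subst hyx; simp [PySem.Dict.getD_modify_self]
      · simp [PySem.Dict.getD_modify_of_ne _ _ _ (by simpa using hyx), hyx])

-- the initial dict {atom: 1 for atom in set(labels_nn)} reads 1 on every member
theorem initDict_getD (s : List String) (d : PySem.Dict String Int) (x : String) :
    (s.foldl (fun d atom => d.insert atom 1) d).getD x 0
      = if x ∈ s then 1 else d.getD x 0 := by
  induction s generalizing d with
  | nil => simp
  | cons a t ih =>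
    simp only [List.foldl_cons, ih, List.mem_cons]
    by_cases hx : x ∈ t
    · simp [hx]
    · by_cases hxa : x = a
      · subst hxa; simp [hx, PySem.Dict.getD_insert_self]
      · simp [hx, hxa, PySem.Dict.getD_insert_of_ne _ _ _ hxa]

-- B's prefix-count comprehension is the same pvPerElem, started at prefix counts + 1
theorem loopB_eq (l pre : List String) :
    (PySem.List.enumerate l (pre.length : Int)).map
      (fun p => p.2 ++ PySem.Int.toStr
        (PySem.List.count (PySem.List.slice (pre ++ l) none (some (p.1 + 1))) p.2))
      = pvPerElem l (fun x => (pre.count x : Int) + 1) := by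
  induction l generalizing pre with
  | nil => simp [PySem.List.enumerate_nil, pvPerElem]
  | cons x t ih =>
    rw [PySem.List.enumerate_cons]
    simp only [List.map_cons, pvPerElem]
    congr 1
    · have hsl : PySem.List.slice (pre ++ x :: t) none (some ((pre.length : Int) + 1))
          = pre ++ [x] := by
        have : ((pre.length : Int) + 1) = ((pre.length + 1 : Nat) : Int) := by push_cast; ring
        rw [this, PySem.List.slice_to_natCast]
        simp [List.take_append, List.take_succ_cons]
      rw [hsl]
      simp [PySem.List.count_eq, List.count_append]
    · have hcast : (pre.length : Int) + 1 = ((pre ++ [x]).length : Int) := by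
        simp
      have := ih (pre ++ [x])
      rw [hcast]
      simp only [List.append_assoc, List.singleton_append] at this
      rw [this]
      apply pvPerElem_congr
      intro y hy
      by_cases hyx : y = x
      · subst hyx
        simp [List.count_append]
      · simp [hyx, Ne.symm hyx, List.count_append, List.count_cons]

-- ===== VERDICT (by name: the statement is the Claim_ definition above) =====
theorem add_label_indices_spec : Claim_equal_add_label_indices := by
  intro labels style _ hpre
  unfold Spec_add_label_indices add_label_indices add_label_indices_alt
  rcases hpre with h | h
  · subst h
    simp only [reduceIte]
    exact enumerate_shift labels 0
  · subst h
    have hne : ("per_element" : String) ≠ "sequential" := by decide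
    simp only [if_neg hne]
    rw [loopA_eq, List.nil_append, remove_eq_map]
    have hB := loopB_eq (labels.map pvStripB) []
    simp only [List.length_nil, Nat.cast_zero, List.nil_append, List.count_nil] at hB
    rw [hB]
    exact (pvPerElem_congr _ _ _ (by
      intro y hy
      rw [initDict_getD]
      simp [PySem.Set.mem_ofList, hy])).symm
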